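-- pv_equiv track=rewrite | github.com/kanatakayasu/apriori-window | paper/G-sequential-dense/implementation/python/sequential_dense.py | compute_sequential_occurrences
-- ===== SOURCE A (Python) =====
-- from typing import Dict, List, Optional, Sequence, Tuple
--
-- def compute_sequential_occurrences(
--     item_occ_map: Dict[int, List[int]],
--     sequence: Tuple[int, ...],
--     max_gap: int,
-- ) -> List[int]:
--     """
--     系列 (a, b, c, ...) の出現タイムスタンプ（系列の最後の要素の出現時刻）を返す。
--
--     系列出現の定義:
--       sequence = (e1, e2, ..., ek) に対し、
--       t1 < t2 < ... < tk かつ各 t_{i+1} - t_i <= max_gap を満たす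
--       (t1, ..., tk) が存在するとき、tk を「系列出現のタイムスタンプ」とする。
--
--     max_gap: 連続する要素間の最大ギャップ（トランザクション数）
--              0 の場合はギャップ制約なし（t_i < t_{i+1} のみ）
--
--     返り値: ソート済みの出現タイムスタンプリスト（重複なし）
--     """
--     if not sequence:
--         return []
--
--     # 単一アイテムの場合
--     if len(sequence) == 1:
--         return list(item_occ_map.get(sequence[0], []))
--
--     # 系列の各アイテムの出現位置を取得
--     occ_lists = []
--     for item in sequence:
--         occs = item_occ_map.get(item, [])
--         if not occs:
--             return []
--         occ_lists.append(occs)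
--
--     # 動的計画法: 系列の接頭辞 (e1, ..., ei) の出現末尾位置を追跡
--     # current_ends[j] = sequence[0:i] が時刻 occ_lists[i-1][j] で終わる出現が存在するか
--     # → 実際には、各段階で「到達可能な末尾時刻」のリストを管理
--     reachable = occ_lists[0][:]  # sequence[0] の出現位置 = 1要素系列の末尾
--
--     for step in range(1, len(sequence)):
--         next_occs = occ_lists[step]
--         next_reachable: List[int] = []
--         r_idx = 0  # reachable のポインタ
--
--         for t in next_occs:
--             # reachable のうち t より前（厳密に小さい）で、ギャップ制約を満たすもの
--             while r_idx < len(reachable) and reachable[r_idx] < t: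
--                 r_idx += 1
--             # r_idx は reachable[r_idx] >= t の最初のインデックス
--             # reachable[r_idx - 1] が t より前の最後の到達可能時刻
--             if r_idx > 0:
--                 prev_t = reachable[r_idx - 1]
--                 if prev_t < t:
--                     gap_ok = (max_gap == 0) or (t - prev_t <= max_gap)
--                     if gap_ok:
--                         next_reachable.append(t)
--
--         reachable = next_reachable
--         if not reachable:
--             return []
--
--     # 重複除去（すでにソート済み）
--     if reachable:
--         unique = [reachable[0]]
--         for v in reachable[1:]:
--             if v != unique[-1]:
--                 unique.append(v)
--         return unique
--     return []
-- ===== SOURCE B (Python) =====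
-- def compute_sequential_occurrences(item_occ_map, sequence, max_gap):
--     """Forward propagation: push every reachable prefix-end time into the next
--     item's occurrence list with one monotonic pointer, then sort the hit set."""
--     if not sequence:
--         return []
--     if len(sequence) == 1:
--         return list(item_occ_map.get(sequence[0], []))
--     reachable = sorted(set(item_occ_map.get(sequence[0], [])))
--     for item in sequence[1:]:
--         occs = item_occ_map.get(item, [])
--         hits = set()
--         j = 0
--         for prev in reachable:
--             while j < len(occs) and occs[j] <= prev:
--                 j += 1
--             if max_gap == 0:
--                 hits.update(occs[j:])
--                 break
--             k = j
--             while k < len(occs) and occs[k] - prev <= max_gap: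
--                 hits.add(occs[k])
--                 k += 1
--         reachable = sorted(hits)
--     return reachable
-- ===== Notes on version B (the rewrite author's own statement) =====
-- stated objective: alternative
-- what changed: The per-step update is recast as forward propagation: instead of scanning next_occs and searching backward for each candidate's strict predecessor with a shared never-resetting pointer, B iterates over each reachable prefix-end time and pushes it forward through the occurrence list with one monotonic pointer, collecting hit timestamps into a set that is then sorted; the pre-scan of occurrence lists, the mid-loop early returns and the final adjacent-dedup pass disappear. …
-- outside the precondition, e.g. on compute_sequential_occurrences({1: [2, 1]}, (1, 1), 0): A returns [], B returns [1, 2]; on compute_sequential_occurrences({6: [2], -2: [-2, -3, 3, 11], 4: [3, 9]}, (-2, -2), 3): A returns [], B returns [-3, -2]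
import Mathlib
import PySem

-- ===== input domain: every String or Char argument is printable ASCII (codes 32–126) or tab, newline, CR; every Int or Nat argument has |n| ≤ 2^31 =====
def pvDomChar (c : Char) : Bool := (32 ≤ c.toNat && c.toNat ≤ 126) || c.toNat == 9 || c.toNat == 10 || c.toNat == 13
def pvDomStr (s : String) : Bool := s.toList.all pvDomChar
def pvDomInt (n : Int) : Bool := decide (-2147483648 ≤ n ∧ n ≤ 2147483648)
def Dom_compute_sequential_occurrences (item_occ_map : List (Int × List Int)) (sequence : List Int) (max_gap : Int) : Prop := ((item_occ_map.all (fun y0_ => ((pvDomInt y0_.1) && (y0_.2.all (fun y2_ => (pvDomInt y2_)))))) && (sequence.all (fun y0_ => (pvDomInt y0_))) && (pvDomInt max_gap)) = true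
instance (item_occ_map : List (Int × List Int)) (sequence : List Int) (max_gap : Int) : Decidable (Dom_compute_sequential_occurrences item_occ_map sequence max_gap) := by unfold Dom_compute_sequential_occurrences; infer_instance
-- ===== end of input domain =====

-- B recasts A's backward predecessor search per candidate as forward propagation of each reachable
-- prefix-end time through the occurrence list, collecting a hit set that is then sorted — objective:
-- alternative decomposition.

-- ===== PORT A =====
-- the inner `while r_idx < len(reachable) and reachable[r_idx] < t: r_idx += 1`
def pvA_adv (reachable : List Int) (r : Nat) (t : Int) : Nat :=
  if h : r < reachable.length then
    if reachable[r] < t then pvA_adv reachable (r + 1) t else r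
  else r
termination_by reachable.length - r

-- the `for t in next_occs:` loop, state = (next_reachable, r_idx)
def pvA_inner (reachable : List Int) (g : Int) : List Int → List Int → Nat → List Int
  | [], acc, _ => acc
  | t :: ts, acc, r =>
    let r' := pvA_adv reachable r t
    if 0 < r' then
      let prev := reachable.getD (r' - 1) 0   -- reachable[r_idx - 1], index in range
      if prev < t then
        if g = 0 ∨ t - prev ≤ g then pvA_inner reachable g ts (acc ++ [t]) r'
        else pvA_inner reachable g ts acc r'
      else pvA_inner reachable g ts acc r'
    else pvA_inner reachable g ts acc r'

-- the `for item in sequence:` collection loop with its early `return []`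
def pvA_collect (d : PySem.Dict Int (List Int)) : List Int → Option (List (List Int))
  | [] => some []
  | i :: rest =>
    let occs := d.getD i []
    if occs = [] then none
    else match pvA_collect d rest with
      | none => none
      | some ls => some (occs :: ls)

-- the `for step in range(1, len(sequence)):` loop with its early `return []` (none)
def pvA_steps (g : Int) : List (List Int) → List Int → Option (List Int)
  | [], reachable => some reachable
  | occs :: rest, reachable =>
    let nr := pvA_inner reachable g occs [] 0
    if nr = [] then none else pvA_steps g rest nr

-- the final adjacent-dedup loop: unique = [reachable[0]]; for v in reachable[1:]: …
def pvA_uniq : List Int → List Int → List Int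
  | acc, [] => acc
  | acc, v :: vs =>
    if v ≠ acc.getLast?.getD 0 then pvA_uniq (acc ++ [v]) vs else pvA_uniq acc vs

def compute_sequential_occurrences (item_occ_map : List (Int × List Int)) (sequence : List Int) (max_gap : Int) : List Int :=
  let d := PySem.Dict.ofList item_occ_map
  match sequence with
  | [] => []
  | [e] => d.getD e []
  | _ :: _ =>
    match pvA_collect d sequence with
    | none => []
    | some occ_lists =>
      match occ_lists with
      | [] => []
      | first :: restLists =>
        match pvA_steps max_gap restLists first with
        | none => []
        | some reachable =>
          match reachable with
          | [] => []
          | r0 :: rtl => pvA_uniq [r0] rtl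

-- ===== PORT B =====
-- `while j < len(occs) and occs[j] <= prev: j += 1`
def pvB_skip (occs : List Int) (prev : Int) (j : Nat) : Nat :=
  if h : j < occs.length then
    if occs[j] ≤ prev then pvB_skip occs prev (j + 1) else j
  else j
termination_by occs.length - j

-- `k = j; while k < len(occs) and occs[k] - prev <= max_gap: hits.add(occs[k]); k += 1`
def pvB_take (occs : List Int) (prev g : Int) (hits : PySem.Set Int) (k : Nat) : PySem.Set Int :=
  if h : k < occs.length then
    if occs[k] - prev ≤ g then pvB_take occs prev g (PySem.Set.add hits occs[k]) (k + 1) else hits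
  else hits
termination_by occs.length - k

-- the `for prev in reachable:` loop with its `break` in the no-gap case
def pvB_scan (occs : List Int) (g : Int) : List Int → PySem.Set Int → Nat → PySem.Set Int
  | [], hits, _ => hits
  | prev :: rest, hits, j =>
    let j' := pvB_skip occs prev j
    if g = 0 then PySem.Set.update hits (occs.drop j')   -- hits.update(occs[j:]); break  (0 ≤ j, so the slice is List.drop)
    else pvB_scan occs g rest (pvB_take occs prev g hits j') j'

def pvB_step (g : Int) (reachable occs : List Int) : List Int :=
  PySem.List.sorted (pvB_scan occs g reachable PySem.Set.empty 0) (fun x => x) false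

def compute_sequential_occurrences_alt (item_occ_map : List (Int × List Int)) (sequence : List Int) (max_gap : Int) : List Int :=
  let d := PySem.Dict.ofList item_occ_map
  match sequence with
  | [] => []
  | e0 :: rest =>
    match rest with
    | [] => d.getD e0 []
    | _ :: _ =>
      rest.foldl (fun reachable item => pvB_step max_gap reachable (d.getD item []))
        (PySem.List.sorted (PySem.Set.ofList (d.getD e0 [])) (fun x => x) false)

-- ===== PRECONDITION & SPEC =====
-- Pre_ excludes inputs where a multi-item sequence has every item present with a non-empty
-- occurrence list but some of those lists unsorted: occurrence lists are sorted timestamps by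
-- construction, and A's never-resetting scan pointer yields accidental results on unsorted lists.
def Pre_compute_sequential_occurrences (item_occ_map : List (Int × List Int)) (sequence : List Int) (max_gap : Int) : Prop :=
  sequence.length ≤ 1 ∨
  (∃ i ∈ sequence, (PySem.Dict.ofList item_occ_map).getD i [] = []) ∨
  (∀ i ∈ sequence, ((PySem.Dict.ofList item_occ_map).getD i []).Pairwise (· ≤ ·))
instance (item_occ_map : List (Int × List Int)) (sequence : List Int) (max_gap : Int) : Decidable (Pre_compute_sequential_occurrences item_occ_map sequence max_gap) := by unfold Pre_compute_sequential_occurrences; infer_instance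

def pvWitness_compute_sequential_occurrences : (List (Int × List Int)) × List Int × Int := ([(1, [0, 2])], [1, 1], 0)

def Spec_compute_sequential_occurrences (item_occ_map : List (Int × List Int)) (sequence : List Int) (max_gap : Int) (out : List Int) : Prop := out = compute_sequential_occurrences_alt item_occ_map sequence max_gap
instance (item_occ_map : List (Int × List Int)) (sequence : List Int) (max_gap : Int) (out : List Int) : Decidable (Spec_compute_sequential_occurrences item_occ_map sequence max_gap out) := by unfold Spec_compute_sequential_occurrences; infer_instance

-- ===== CLAIM (what is proved, stated in full; the proofs are below) =====
def Claim_equal_compute_sequential_occurrences : Prop := ∀ (item_occ_map : List (Int × List Int)) (sequence : List Int) (max_gap : Int), Dom_compute_sequential_occurrences item_occ_map sequence max_gap → Pre_compute_sequential_occurrences item_occ_map sequence max_gap → Spec_compute_sequential_occurrences item_occ_map sequence max_gap (compute_sequential_occurrences item_occ_map sequence max_gap)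

-- ===== LEMMAS AND PROOFS =====

-- t is a valid successor of the prefix-end set R under gap g
def pvValid (R : List Int) (g t : Int) : Prop := ∃ p ∈ R, p < t ∧ (g = 0 ∨ t - p ≤ g)

theorem pvValid_congr (R R' : List Int) (h : ∀ x, x ∈ R ↔ x ∈ R') (g t : Int) :
    pvValid R g t ↔ pvValid R' g t := by
  unfold pvValid
  exact ⟨fun ⟨p, hp, h2⟩ => ⟨p, (h p).mp hp, h2⟩, fun ⟨p, hp, h2⟩ => ⟨p, (h p).mpr hp, h2⟩⟩

theorem pvValid_nil (g t : Int) : ¬ pvValid [] g t := by simp [pvValid]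

-- Bool twin used in filters
def pvValidB (R : List Int) (g t : Int) : Bool :=
  R.any (fun p => decide (p < t) && (decide (g = 0) || decide (t - p ≤ g)))

theorem pvValidB_iff (R : List Int) (g t : Int) : pvValidB R g t = true ↔ pvValid R g t := by
  simp [pvValidB, pvValid]

-- elements of a sorted list's suffix dominate the pivot
theorem sorted_getElem_le_mem_drop (l : List Int) (h : l.Pairwise (· ≤ ·)) (k : Nat) (hk : k < l.length) :
    ∀ t ∈ l.drop k, l[k] ≤ t := by
  have hp : (l.drop k).Pairwise (· ≤ ·) := h.sublist (List.drop_sublist k l)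
  rw [List.drop_eq_getElem_cons hk] at hp ⊢
  intro t ht
  rcases List.mem_cons.mp ht with rfl | ht
  · exact le_refl _
  · exact List.rel_of_pairwise_cons hp ht

theorem mem_drop_of_gt (l : List Int) (j : Nat) (prev t : Int) (ht : t ∈ l)
    (hlo : ∀ x ∈ l.take j, x ≤ prev) (hgt : prev < t) : t ∈ l.drop j := by
  have hsplit : l.take j ++ l.drop j = l := List.take_append_drop j l
  have ht' : t ∈ l.take j ++ l.drop j := by rw [hsplit]; exact ht
  rcases List.mem_append.mp ht' with h | h
  · exact absurd (hlo t h) (by omega)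
  · exact h

-- ===== A-side: the shared pointer computes the strict-predecessor prefix =====
theorem pvA_adv_eq (l : List Int) (t : Int) : ∀ r, pvA_adv l r t = r + ((l.drop r).takeWhile (fun p => decide (p < t))).length := by
  intro r
  fun_induction pvA_adv l r t with
  | case1 r h hlt ih =>
    rw [List.drop_eq_getElem_cons h] at *
    simp only [List.takeWhile_cons, hlt, decide_true, if_true, List.length_cons]
    omega
  | case2 r h hlt =>
    rw [List.drop_eq_getElem_cons h]
    simp [List.takeWhile_cons, hlt]
  | case3 r h =>
    rw [List.drop_eq_nil_of_le (by omega)]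
    simp

theorem takeWhile_lt_split (l : List Int) (M t : Int) (h : M ≤ t) :
    l.takeWhile (fun p => decide (p < t)) =
      l.takeWhile (fun p => decide (p < M)) ++ (l.dropWhile (fun p => decide (p < M))).takeWhile (fun p => decide (p < t)) := by
  induction l with
  | nil => simp
  | cons v vs ih =>
    by_cases hv : v < M
    · simp only [List.takeWhile_cons, List.dropWhile_cons, hv, decide_true,
        show v < t from lt_of_lt_of_le hv h, if_true, List.cons_append]
      rw [ih]
    · simp [List.takeWhile_cons, List.dropWhile_cons, hv]

theorem drop_len_takeWhile (l : List Int) (p : Int → Bool) :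
    l.drop (l.takeWhile p).length = l.dropWhile p := by
  induction l with
  | nil => simp
  | cons v vs ih =>
    by_cases hv : p v = true
    · simp [List.takeWhile_cons, List.dropWhile_cons, hv, ih]
    · simp [List.takeWhile_cons, List.dropWhile_cons, hv]

theorem head_dropWhile_false (l : List Int) (p : Int → Bool) (v : Int) (vs : List Int)
    (h : l.dropWhile p = v :: vs) : p v = false := by
  induction l with
  | nil => simp at h
  | cons a as ih =>
    by_cases ha : p a = true
    · rw [List.dropWhile_cons_of_pos ha] at h; exact ih h
    · rw [List.dropWhile_cons_of_neg ha] at h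
      cases h; simpa using ha

theorem pvA_adv_takeWhile (l : List Int) (M t : Int) :
    pvA_adv l (l.takeWhile (fun p => decide (p < M))).length t =
      (l.takeWhile (fun p => decide (p < max M t))).length := by
  rw [pvA_adv_eq, drop_len_takeWhile]
  rcases le_total M t with hMt | htM
  · rw [max_eq_right hMt, takeWhile_lt_split l M t hMt, List.length_append]
  · rw [max_eq_left htM]
    cases hdr : (l.dropWhile (fun p => decide (p < M))) with
    | nil => simp
    | cons v vs =>
      have hv := head_dropWhile_false l _ v vs hdr
      simp only [decide_eq_false_iff_not, not_lt] at hv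
      simp [List.takeWhile_cons, show ¬ (v < t) by omega]

theorem pvA_adv_zero (l : List Int) (t : Int) :
    pvA_adv l 0 t = (l.takeWhile (fun p => decide (p < t))).length := by
  simpa using pvA_adv_eq l t 0

-- suffix beyond the (< t)-prefix of a sorted list has no element < t
theorem drop_takeWhile_not_lt (R : List Int) (hR : R.Pairwise (· ≤ ·)) (t : Int) :
    ∀ x ∈ R.drop (R.takeWhile (fun p => decide (p < t))).length, ¬ x < t := by
  rw [drop_len_takeWhile]
  cases hdr : R.dropWhile (fun p => decide (p < t)) with
  | nil => simp
  | cons v vs =>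
    have hv := head_dropWhile_false R _ v vs hdr
    simp only [decide_eq_false_iff_not] at hv
    have hp : (v :: vs).Pairwise (· ≤ ·) := by
      rw [← hdr]; exact hR.sublist (List.dropWhile_sublist _)
    intro x hx
    rcases List.mem_cons.mp hx with rfl | hx
    · exact hv
    · have := List.rel_of_pairwise_cons hp hx
      omega

-- the pointer-found predecessor test is exactly "t has a valid predecessor" (sorted R)
theorem condA_iff (R : List Int) (hR : R.Pairwise (· ≤ ·)) (g t : Int) :
    (0 < (R.takeWhile (fun p => decide (p < t))).length ∧
      R.getD ((R.takeWhile (fun p => decide (p < t))).length - 1) 0 < t ∧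
      (g = 0 ∨ t - R.getD ((R.takeWhile (fun p => decide (p < t))).length - 1) 0 ≤ g)) ↔
    pvValid R g t := by
  set P := R.takeWhile (fun p => decide (p < t)) with hP
  have hPpre : P <+: R := by rw [hP]; exact List.takeWhile_prefix _
  have hPlen : P.length ≤ R.length := hPpre.length_le
  have hPtake : P = R.take P.length := List.prefix_iff_eq_take.mp hPpre
  have hPe : ∀ (i : Nat) (h : i < P.length), P[i] = R[i]'(lt_of_lt_of_le h hPlen) :=
    fun i h => List.IsPrefix.getElem hPpre h
  constructor
  · rintro ⟨h0, hlt, hgap⟩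
    have hkR : P.length - 1 < R.length := by omega
    refine ⟨R.getD (P.length - 1) 0, ?_, hlt, hgap⟩
    rw [List.getD_eq_getElem _ _ hkR]
    exact List.getElem_mem hkR
  · rintro ⟨p, hp, hpt, hgap⟩
    -- p is in the (< t)-prefix, so the prefix is nonempty
    have hsplit : P ++ R.dropWhile (fun p => decide (p < t)) = R := by
      rw [hP]; exact List.takeWhile_append_dropWhile
    have hp' : p ∈ P ++ R.dropWhile (fun p => decide (p < t)) := by rw [hsplit]; exact hp
    have hpP : p ∈ P := by
      rcases List.mem_append.mp hp' with h | h
      · exact h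
      · exact absurd hpt (by
          have hmem2 : p ∈ R.drop P.length := by rw [hP, drop_len_takeWhile]; exact h
          have := drop_takeWhile_not_lt R hR t p (by rw [← hP]; exact hmem2)
          omega)
    have h0 : 0 < P.length := List.length_pos_of_mem hpP
    have hkR : P.length - 1 < R.length := by omega
    have hlast_mem : R[P.length - 1] ∈ P := by
      rw [List.mem_iff_getElem]
      exact ⟨P.length - 1, by omega, hPe _ (by omega)⟩
    have hlast_lt : R[P.length - 1] < t := by
      have hm : R[P.length - 1] ∈ R.takeWhile (fun p => decide (p < t)) := by
        rw [← hP]; exact hlast_mem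
      have := List.mem_takeWhile_imp hm
      simpa using this
    -- p ≤ last element of the prefix
    have hple : p ≤ R[P.length - 1] := by
      obtain ⟨i, hi, rfl⟩ := List.mem_iff_getElem.mp hp
      by_cases hik : i < P.length
      · rcases Nat.lt_or_ge i (P.length - 1) with hlt2 | hge
        · exact List.pairwise_iff_getElem.mp hR i (P.length - 1) hi hkR hlt2
        · have : i = P.length - 1 := by omega
          subst this; exact le_refl _
      · exact absurd hpt (by
          have hmem3 : R[i] ∈ R.drop P.length := by
            have hgd : (R.drop P.length)[i - P.length]'(by simp; omega) = R[i] := by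
              rw [List.getElem_drop]; congr 1; omega
            rw [← hgd]; exact List.getElem_mem _
          have := drop_takeWhile_not_lt R hR t _ (by rw [← hP]; exact hmem3)
          omega)
    rw [List.getD_eq_getElem _ _ hkR]
    refine ⟨h0, hlast_lt, ?_⟩
    rcases hgap with h | h
    · exact Or.inl h
    · exact Or.inr (by omega)

theorem pvA_inner_filter (R : List Int) (g : Int) (hR : R.Pairwise (· ≤ ·)) :
    ∀ (occs : List Int), occs.Pairwise (· ≤ ·) → ∀ (acc : List Int) (r : Nat),
      (r = 0 ∨ ∃ m, r = (R.takeWhile (fun p => decide (p < m))).length ∧ ∀ t ∈ occs, m ≤ t) →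
      pvA_inner R g occs acc r = acc ++ occs.filter (fun t => pvValidB R g t) := by
  intro occs
  induction occs with
  | nil => intro _ acc r _; simp [pvA_inner]
  | cons t ts ih =>
    intro hsort acc r hr
    have hts : ts.Pairwise (· ≤ ·) := hsort.of_cons
    have hadv : pvA_adv R r t = (R.takeWhile (fun p => decide (p < t))).length := by
      rcases hr with rfl | ⟨m, rfl, hm⟩
      · exact pvA_adv_zero R t
      · have hmt : m ≤ t := hm t (List.mem_cons_self)
        rw [pvA_adv_takeWhile, max_eq_right hmt]
    have hinv : ∃ m, (R.takeWhile (fun p => decide (p < m))).length =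
        (R.takeWhile (fun p => decide (p < t))).length ∧ ∀ t' ∈ ts, m ≤ t' := by
      exact ⟨t, rfl, fun t' ht' => List.rel_of_pairwise_cons hsort ht'⟩
    have hih : ∀ acc' : List Int, pvA_inner R g ts acc' (R.takeWhile (fun p => decide (p < t))).length
        = acc' ++ ts.filter (fun t => pvValidB R g t) := by
      intro acc'
      exact ih hts acc' _ (Or.inr ⟨t, rfl, fun t' ht' => List.rel_of_pairwise_cons hsort ht'⟩)
    simp only [pvA_inner, hadv]
    by_cases hv : pvValid R g t
    · obtain ⟨h0, hlt, hgap⟩ := (condA_iff R hR g t).mpr hv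
      rw [if_pos h0, if_pos hlt, if_pos hgap, hih (acc ++ [t]),
        List.filter_cons_of_pos ((pvValidB_iff R g t).mpr hv)]
      simp
    · have hfilt : (t :: ts).filter (fun t => pvValidB R g t) = ts.filter (fun t => pvValidB R g t) :=
        List.filter_cons_of_neg (by
          cases hb : pvValidB R g t
          · simp [hb]
          · exact absurd ((pvValidB_iff R g t).mp hb) hv)
      rw [hfilt]
      split_ifs with h0 hlt hgap
      · exact absurd ((condA_iff R hR g t).mp ⟨h0, hlt, hgap⟩) hv
      · exact hih acc
      · exact hih acc
      · exact hih acc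

-- ===== B-side: the forward scan collects exactly the valid successors =====
theorem pvB_skip_spec (occs : List Int) (prev : Int) (hs : occs.Pairwise (· ≤ ·)) :
    ∀ j, (∀ x ∈ occs.take j, x ≤ prev) →
      (∀ x ∈ occs.take (pvB_skip occs prev j), x ≤ prev) ∧
      (∀ t ∈ occs.drop (pvB_skip occs prev j), prev < t) := by
  intro j
  fun_induction pvB_skip occs prev j with
  | case1 j h hle ih =>
    intro htake
    apply ih
    intro x hx
    rw [List.take_succ] at hx
    rcases List.mem_append.mp hx with hx | hx
    · exact htake x hx
    · simp only [List.getElem?_eq_getElem h] at hx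
      simp only [Option.toList_some, List.mem_singleton] at hx
      subst hx; exact hle
  | case2 j h hle =>
    intro htake
    refine ⟨htake, fun t ht => ?_⟩
    have := sorted_getElem_le_mem_drop occs hs j h t ht
    omega
  | case3 j h =>
    intro htake
    refine ⟨htake, fun t ht => ?_⟩
    rw [List.drop_eq_nil_of_le (by omega)] at ht
    simp at ht

theorem pvB_take_mem (occs : List Int) (prev g : Int) (hs : occs.Pairwise (· ≤ ·)) :
    ∀ k (hits : PySem.Set Int) (t : Int),
      (t ∈ pvB_take occs prev g hits k ↔ t ∈ hits ∨ (t ∈ occs.drop k ∧ t - prev ≤ g)) := by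
  intro k hits t
  fun_induction pvB_take occs prev g hits k with
  | case1 hits k h hle ih =>
    rw [ih, PySem.Set.mem_add, List.drop_eq_getElem_cons h]
    simp only [List.mem_cons]
    constructor
    · rintro ((h1 | rfl) | ⟨h2, h3⟩)
      · exact Or.inl h1
      · exact Or.inr ⟨Or.inl rfl, hle⟩
      · exact Or.inr ⟨Or.inr h2, h3⟩
    · rintro (h1 | ⟨(rfl | h2), h3⟩)
      · exact Or.inl (Or.inl h1)
      · exact Or.inl (Or.inr rfl)
      · exact Or.inr ⟨h2, h3⟩
  | case2 hits k h hgt =>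
    constructor
    · exact Or.inl
    · rintro (h1 | ⟨h2, h3⟩)
      · exact h1
      · have := sorted_getElem_le_mem_drop occs hs k h t h2
        omega
  | case3 hits k h =>
    rw [List.drop_eq_nil_of_le (by omega)]
    simp

theorem pvB_take_nodup (occs : List Int) (prev g : Int) :
    ∀ k (hits : PySem.Set Int), hits.Nodup → (pvB_take occs prev g hits k).Nodup := by
  intro k hits hnd
  fun_induction pvB_take occs prev g hits k with
  | case1 hits k h hle ih => exact ih (PySem.Set.nodup_add hits _ hnd)
  | case2 hits k h hgt => exact hnd
  | case3 hits k h => exact hnd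

theorem pvValid_cons (p : Int) (R : List Int) (g t : Int) :
    pvValid (p :: R) g t ↔ (p < t ∧ (g = 0 ∨ t - p ≤ g)) ∨ pvValid R g t := by
  simp only [pvValid, List.mem_cons]
  constructor
  · rintro ⟨q, (rfl | hq), h2⟩
    · exact Or.inl h2
    · exact Or.inr ⟨q, hq, h2⟩
  · rintro (h2 | ⟨q, hq, h2⟩)
    · exact ⟨p, Or.inl rfl, h2⟩
    · exact ⟨q, Or.inr hq, h2⟩

theorem pvB_scan_spec (occs : List Int) (g : Int) (hoccs : occs.Pairwise (· ≤ ·)) :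
    ∀ (R : List Int) (hits : PySem.Set Int) (j : Nat), R.Pairwise (· ≤ ·) →
      (∀ x ∈ occs.take j, ∀ p ∈ R, x ≤ p) → hits.Nodup →
      (pvB_scan occs g R hits j).Nodup ∧
        ∀ t, (t ∈ pvB_scan occs g R hits j ↔ t ∈ hits ∨ (t ∈ occs ∧ pvValid R g t)) := by
  intro R
  induction R with
  | nil =>
    intro hits j _ _ hnd
    refine ⟨hnd, fun t => ?_⟩
    simp [pvB_scan, pvValid_nil]
  | cons prev rest ih =>
    intro hits j hR htake hnd
    have hrest : rest.Pairwise (· ≤ ·) := hR.of_cons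
    have hskip := pvB_skip_spec occs prev hoccs j (fun x hx => htake x hx prev (List.mem_cons_self))
    set j' := pvB_skip occs prev j with hj'
    have hwin : ∀ t, t ∈ occs.drop j' ↔ t ∈ occs ∧ prev < t := by
      intro t
      constructor
      · intro ht
        exact ⟨List.mem_of_mem_drop ht, hskip.2 t ht⟩
      · rintro ⟨ht, hgt⟩
        exact mem_drop_of_gt occs j' prev t ht hskip.1 hgt
    by_cases hg : g = 0
    · subst hg
      simp only [pvB_scan]
      simp only [if_true]
      refine ⟨PySem.Set.nodup_update hits _ hnd, fun t => ?_⟩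
      rw [PySem.Set.mem_update, hwin t, pvValid_cons]
      constructor
      · rintro (h1 | ⟨h2, h3⟩)
        · exact Or.inl h1
        · exact Or.inr ⟨h2, Or.inl ⟨h3, Or.inl rfl⟩⟩
      · rintro (h1 | ⟨h2, (⟨h3, _⟩ | ⟨p, hp, hpt, _⟩)⟩)
        · exact Or.inl h1
        · exact Or.inr ⟨h2, h3⟩
        · have : prev ≤ p := List.rel_of_pairwise_cons hR hp
          exact Or.inr ⟨h2, by omega⟩
    · simp only [pvB_scan, if_neg hg]
      have htake' : ∀ x ∈ occs.take j', ∀ p ∈ rest, x ≤ p := by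
        intro x hx p hp
        exact le_trans (hskip.1 x hx) (List.rel_of_pairwise_cons hR hp)
      obtain ⟨hnd', hmem'⟩ := ih (pvB_take occs prev g hits j') j' hrest htake'
        (pvB_take_nodup occs prev g j' hits hnd)
      refine ⟨hnd', fun t => ?_⟩
      rw [hmem' t, pvB_take_mem occs prev g hoccs j' hits t, pvValid_cons]
      have hw := hwin t
      constructor
      · rintro ((h1 | ⟨h2, h3⟩) | ⟨h4, h5⟩)
        · exact Or.inl h1
        · exact Or.inr ⟨(hw.mp h2).1, Or.inl ⟨(hw.mp h2).2, Or.inr h3⟩⟩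
        · exact Or.inr ⟨h4, Or.inr h5⟩
      · rintro (h1 | ⟨h2, (⟨h3, (h4 | h4)⟩ | h5)⟩)
        · exact Or.inl (Or.inl h1)
        · exact absurd h4 hg
        · exact Or.inl (Or.inr ⟨hw.mpr ⟨h2, h3⟩, h4⟩)
        · exact Or.inr ⟨h2, h5⟩

theorem pairwise_lt_of_le_nodup (l : List Int) (hle : l.Pairwise (· ≤ ·)) (hnd : l.Nodup) :
    l.Pairwise (· < ·) :=
  (hle.and hnd).imp (fun h => lt_of_le_of_ne h.1 h.2)

theorem pvB_step_spec (g : Int) (RB occs : List Int) (hRB : RB.Pairwise (· ≤ ·)) (hoccs : occs.Pairwise (· ≤ ·)) :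
    (pvB_step g RB occs).Pairwise (· < ·) ∧
      ∀ t, (t ∈ pvB_step g RB occs ↔ t ∈ occs ∧ pvValid RB g t) := by
  obtain ⟨hnd, hmem⟩ := pvB_scan_spec occs g hoccs RB PySem.Set.empty 0 hRB
    (by simp) List.nodup_nil
  unfold pvB_step
  constructor
  · apply pairwise_lt_of_le_nodup
    · exact PySem.List.sorted_pairwise _ _
    · exact (PySem.List.sorted_perm _ _ _).nodup_iff.mpr hnd
  · intro t
    rw [PySem.List.mem_sorted, hmem t]
    have hemp : ¬ t ∈ (PySem.Set.empty : PySem.Set Int) := by simp [PySem.Set.empty]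
    tauto

-- ===== dedup: A's adjacent-dedup of a sorted list is the strictly sorted member list =====
def pvAdj : Int → List Int → List Int
  | _, [] => []
  | p, v :: vs => if v ≠ p then v :: pvAdj v vs else pvAdj p vs

theorem pvA_uniq_adj : ∀ (xs acc : List Int) (p : Int), pvA_uniq (acc ++ [p]) xs = (acc ++ [p]) ++ pvAdj p xs := by
  intro xs
  induction xs with
  | nil => intro acc p; simp [pvA_uniq, pvAdj]
  | cons v vs ih =>
    intro acc p
    simp only [pvA_uniq, pvAdj, List.getLast?_concat, Option.getD_some]
    split_ifs with h
    · rw [ih (acc ++ [p]) v]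
      simp
    · exact ih acc p

theorem pvAdj_spec : ∀ (xs : List Int) (p : Int), (p :: xs).Pairwise (· ≤ ·) →
    (p :: pvAdj p xs).Pairwise (· < ·) ∧ ∀ t, (t ∈ p :: pvAdj p xs ↔ t ∈ p :: xs) := by
  intro xs
  induction xs with
  | nil =>
    intro p _
    exact ⟨by simp [pvAdj], fun t => by simp [pvAdj]⟩
  | cons v vs ih =>
    intro p hp
    have hpv : p ≤ v := List.rel_of_pairwise_cons hp List.mem_cons_self
    have hvvs : (v :: vs).Pairwise (· ≤ ·) := hp.of_cons
    obtain ⟨h1, h2⟩ := ih v hvvs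
    by_cases hv : v = p
    · subst hv
      rw [show pvAdj v (v :: vs) = pvAdj v vs from by simp [pvAdj]]
      refine ⟨h1, fun t => ?_⟩
      have h2t := h2 t
      simp only [List.mem_cons] at h2t ⊢
      tauto
    · rw [show pvAdj p (v :: vs) = v :: pvAdj v vs from by simp [pvAdj, hv]]
      have hpv' : p < v := lt_of_le_of_ne hpv (fun h => hv h.symm)
      constructor
      · refine List.Pairwise.cons (fun x hx => ?_) h1
        have hxm : x ∈ v :: vs := (h2 x).mp hx
        have hvx : v ≤ x := by
          rcases List.mem_cons.mp hxm with rfl | hxm2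
          · exact le_refl _
          · exact List.rel_of_pairwise_cons hvvs hxm2
        omega
      · intro t
        have h2t := h2 t
        simp only [List.mem_cons] at h2t ⊢
        tauto

theorem strict_eq (l₁ l₂ : List Int) (h1 : l₁.Pairwise (· < ·)) (h2 : l₂.Pairwise (· < ·))
    (hmem : ∀ t, t ∈ l₁ ↔ t ∈ l₂) : l₁ = l₂ := by
  have hnd1 : l₁.Nodup := h1.imp ne_of_lt
  have hnd2 : l₂.Nodup := h2.imp ne_of_lt
  have hperm : l₁.Perm l₂ := (List.perm_ext_iff_of_nodup hnd1 hnd2).mpr hmem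
  have e1 : PySem.List.sorted l₂ (fun x => x) = l₁ :=
    PySem.List.sorted_eq_of_perm_of_pairwise_lt _ _ _ hperm h1
  have e2 : PySem.List.sorted l₂ (fun x => x) = l₂ :=
    PySem.List.sorted_eq_self_of_pairwise _ _ (h2.imp le_of_lt)
  rw [← e1, e2]

-- ===== degenerate propagation =====
theorem pvB_scan_occs_nil (g : Int) : ∀ (R : List Int) (hits : PySem.Set Int) (j : Nat),
    pvB_scan [] g R hits j = hits := by
  intro R
  induction R with
  | nil => intro hits j; rfl
  | cons prev rest ih =>
    intro hits j
    have hskip : pvB_skip [] prev j = j := by unfold pvB_skip; simp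
    have htake : pvB_take [] prev g hits j = hits := by unfold pvB_take; simp
    simp only [pvB_scan, hskip, htake, List.drop_nil]
    split_ifs with h
    · exact PySem.Set.update_nil hits
    · exact ih hits j

theorem pvB_step_occs_nil (g : Int) (R : List Int) : pvB_step g R [] = [] := by
  unfold pvB_step
  rw [pvB_scan_occs_nil]
  rfl

theorem pvB_step_reach_nil (g : Int) (occs : List Int) : pvB_step g [] occs = [] := by
  unfold pvB_step
  rfl

theorem pvB_foldl_nil (g : Int) : ∀ (Ls : List (List Int)),
    Ls.foldl (fun r occs => pvB_step g r occs) [] = [] := by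
  intro Ls
  induction Ls with
  | nil => rfl
  | cons occs Ls ih => simpa [pvB_step_reach_nil] using ih

theorem pvB_foldl_absorb (g : Int) : ∀ (Ls : List (List Int)) (RB : List Int),
    [] ∈ Ls → Ls.foldl (fun r occs => pvB_step g r occs) RB = [] := by
  intro Ls
  induction Ls with
  | nil => intro RB h; simp at h
  | cons occs Ls ih =>
    intro RB h
    rcases List.mem_cons.mp h with rfl | h
    · simpa [pvB_step_occs_nil] using pvB_foldl_nil g Ls
    · exact ih _ h

-- ===== A-side collection =====
theorem pvA_collect_all (d : PySem.Dict Int (List Int)) : ∀ (items : List Int),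
    (∀ i ∈ items, d.getD i [] ≠ []) → pvA_collect d items = some (items.map (fun i => d.getD i [])) := by
  intro items
  induction items with
  | nil => intro _; rfl
  | cons i rest ih =>
    intro h
    simp only [pvA_collect, if_neg (h i (List.mem_cons_self)), ih (fun j hj => h j (List.mem_cons_of_mem i hj)), List.map_cons]

theorem pvA_collect_none (d : PySem.Dict Int (List Int)) : ∀ (items : List Int) (i : Int),
    i ∈ items → d.getD i [] = [] → pvA_collect d items = none := by
  intro items
  induction items with
  | nil => intro i h; simp at h
  | cons j rest ih =>
    intro i h he
    rcases List.mem_cons.mp h with rfl | h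
    · simp only [pvA_collect, if_pos he]
    · simp only [pvA_collect]
      rw [ih i h he]
      split <;> rfl

-- ===== the step chains agree =====
theorem steps_agree (g : Int) : ∀ (Ls : List (List Int)) (RA RB : List Int),
    (∀ l ∈ Ls, l.Pairwise (· ≤ ·)) → RA.Pairwise (· ≤ ·) → RB.Pairwise (· < ·) →
    (∀ t, t ∈ RA ↔ t ∈ RB) →
    (match pvA_steps g Ls RA with
     | none => ([] : List Int)
     | some r => match r with | [] => [] | r0 :: rtl => pvA_uniq [r0] rtl)
    = Ls.foldl (fun r occs => pvB_step g r occs) RB := by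
  intro Ls
  induction Ls with
  | nil =>
    intro RA RB _ hRA hRB hmem
    simp only [pvA_steps, List.foldl_nil]
    cases RA with
    | nil =>
      have : RB = [] := List.eq_nil_iff_forall_not_mem.mpr (fun t ht => by
        have := (hmem t).mpr ht; simp at this)
      rw [this]
    | cons r0 rtl =>
      show pvA_uniq [r0] rtl = RB
      have huniq : pvA_uniq [r0] rtl = r0 :: pvAdj r0 rtl := by
        have := pvA_uniq_adj rtl [] r0
        simpa using this
      rw [huniq]
      obtain ⟨hlt, hm⟩ := pvAdj_spec rtl r0 hRA
      exact strict_eq _ _ hlt hRB (fun t => (hm t).trans (hmem t))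
  | cons occs Ls' ih =>
    intro RA RB hLs hRA hRB hmem
    have hoccs : occs.Pairwise (· ≤ ·) := hLs occs (List.mem_cons_self)
    have hLs' : ∀ l ∈ Ls', l.Pairwise (· ≤ ·) := fun l hl => hLs l (List.mem_cons_of_mem _ hl)
    have hRBle : RB.Pairwise (· ≤ ·) := hRB.imp le_of_lt
    have hnrA : pvA_inner RA g occs [] 0 = occs.filter (fun t => pvValidB RA g t) := by
      have := pvA_inner_filter RA g hRA occs hoccs [] 0 (Or.inl rfl)
      simpa using this
    obtain ⟨hB'lt, hB'mem⟩ := pvB_step_spec g RB occs hRBle hoccs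
    have hmem' : ∀ t, t ∈ occs.filter (fun t => pvValidB RA g t) ↔ t ∈ pvB_step g RB occs := by
      intro t
      rw [List.mem_filter, hB'mem t, pvValidB_iff]
      exact and_congr_right (fun _ => pvValid_congr RA RB hmem g t)
    simp only [pvA_steps, hnrA, List.foldl_cons]
    by_cases hnil : occs.filter (fun t => pvValidB RA g t) = []
    · rw [if_pos hnil]
      have hB'nil : pvB_step g RB occs = [] := List.eq_nil_iff_forall_not_mem.mpr (fun t ht => by
        have := (hmem' t).mpr ht
        rw [hnil] at this
        simp at this)
      rw [hB'nil, pvB_foldl_nil]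
    · rw [if_neg hnil]
      exact ih _ _ hLs' (hoccs.sublist List.filter_sublist) hB'lt hmem'

-- ===== VERDICT (by name: the statement is the Claim_ definition above) =====
theorem compute_sequential_occurrences_spec : Claim_equal_compute_sequential_occurrences := by
  intro item_occ_map sequence max_gap _ hpre
  unfold Spec_compute_sequential_occurrences
  unfold compute_sequential_occurrences compute_sequential_occurrences_alt
  cases sequence with
  | nil => rfl
  | cons e0 rest =>
    cases rest with
    | nil => rfl
    | cons e1 rs =>
      simp only []
      set d := PySem.Dict.ofList item_occ_map with hd
      set f : Int → List Int := fun i => d.getD i [] with hf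
      have hfold : ((e1 :: rs).foldl (fun reachable item => pvB_step max_gap reachable (d.getD item []))
            (PySem.List.sorted (PySem.Set.ofList (d.getD e0 [])) (fun x => x) false))
          = ((e1 :: rs).map f).foldl (fun r occs => pvB_step max_gap r occs)
            (PySem.List.sorted (PySem.Set.ofList (f e0)) (fun x => x) false) := by
        rw [List.foldl_map]
      by_cases hemp : ∃ i ∈ e0 :: e1 :: rs, f i = []
      · obtain ⟨i, hi, hie⟩ := hemp
        rw [pvA_collect_none d _ i hi hie]
        show ([] : List Int) = _
        rw [hfold]
        rcases List.mem_cons.mp hi with rfl | hi2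
        · rw [hie]
          show ([] : List Int) = ((e1 :: rs).map f).foldl _ (PySem.List.sorted (PySem.Set.ofList []) (fun x => x) false)
          rw [show PySem.List.sorted (PySem.Set.ofList ([] : List Int)) (fun x => x) false = [] from rfl]
          rw [pvB_foldl_nil]
        · rw [pvB_foldl_absorb max_gap _ _ (List.mem_map.mpr ⟨i, hi2, hie⟩)]
      · push_neg at hemp
        have hsort : ∀ i ∈ e0 :: e1 :: rs, (f i).Pairwise (· ≤ ·) := by
          rcases hpre with hlen | hex | hsort
          · simp at hlen
          · obtain ⟨i, hi, hie⟩ := hex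
            exact absurd hie (hemp i hi)
          · exact hsort
        rw [pvA_collect_all d _ hemp]
        show (match pvA_steps max_gap ((e1 :: rs).map f) (f e0) with
              | none => ([] : List Int)
              | some reachable =>
                match reachable with
                | [] => []
                | r0 :: rtl => pvA_uniq [r0] rtl) = _
        rw [hfold]
        apply steps_agree
        · intro l hl
          obtain ⟨i, hi, rfl⟩ := List.mem_map.mp hl
          exact hsort i (List.mem_cons_of_mem _ hi)
        · exact hsort e0 (List.mem_cons_self)
        · exact PySem.List.sorted_ofList_pairwise_lt _
        · intro t
          rw [PySem.List.mem_sorted, PySem.Set.mem_ofList]
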